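-- pv_equiv track=rewrite | github.com/nivandosoares/asmdump | tools/extract_bank3_palettes.py | group_colors
-- ===== SOURCE A (Python) =====
-- def bgr555_to_rgb888(value: int) -> list[int]:
--     blue = (value >> 10) & 0x1F
--     green = (value >> 5) & 0x1F
--     red = value & 0x1F
--     return [
--         (red << 3) | (red >> 2),
--         (green << 3) | (green >> 2),
--         (blue << 3) | (blue >> 2),
--     ]
--
-- def group_colors(words: list[int], palette_size: int) -> list[list[list[int]]]:
--     if len(words) % palette_size != 0:
--         raise ValueError(
--             f"word count {len(words)} is not divisible by palette size {palette_size}"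
--         )
--
--     colors = [bgr555_to_rgb888(word) for word in words]
--     return [
--         colors[i:i + palette_size]
--         for i in range(0, len(colors), palette_size)
--     ]
-- ===== SOURCE B (Python) =====
-- def group_colors(words: list[int], palette_size: int) -> list[list[list[int]]]:
--     if len(words) % palette_size != 0:
--         raise ValueError(
--             f"word count {len(words)} is not divisible by palette size {palette_size}"
--         )
--
--     result = []
--     current = []
--     for value in words:
--         red = value & 0x1F
--         green = (value >> 5) & 0x1F
--         blue = (value >> 10) & 0x1F
--         current.append([
--             (red << 3) | (red >> 2),
--             (green << 3) | (green >> 2),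
--             (blue << 3) | (blue >> 2),
--         ])
--         if len(current) == palette_size:
--             result.append(current)
--             current = []
--     return result
-- ===== Notes on version B (the rewrite author's own statement) =====
-- stated objective: alternative
-- what changed: Replaces the two-phase map-then-slice (build the full colors list, then slice it per range step) with a single pass that converts each word inline and flushes a running palette buffer whenever it fills.
import Mathlib
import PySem

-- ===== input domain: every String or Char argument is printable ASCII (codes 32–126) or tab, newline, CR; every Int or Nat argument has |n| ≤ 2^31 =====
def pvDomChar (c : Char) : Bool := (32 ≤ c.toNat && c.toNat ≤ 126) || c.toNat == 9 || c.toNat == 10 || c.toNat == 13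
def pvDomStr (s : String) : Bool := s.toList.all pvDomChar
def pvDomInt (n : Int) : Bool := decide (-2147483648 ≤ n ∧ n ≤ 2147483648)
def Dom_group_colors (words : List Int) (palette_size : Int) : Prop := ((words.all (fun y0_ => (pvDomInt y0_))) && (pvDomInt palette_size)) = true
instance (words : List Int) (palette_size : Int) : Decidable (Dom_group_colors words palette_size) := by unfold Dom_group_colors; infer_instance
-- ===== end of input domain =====

-- B interleaves the BGR555→RGB888 conversion and the palette grouping into ONE pass with a running
-- buffer, instead of A's two phases (full colors list, then slices per range step). Return values
-- agree on all inputs where A returns (Pre_ excludes exactly A's ValueError/ZeroDivisionError raises).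

-- ===== PORT A =====
def bgr555_to_rgb888 (value : Int) : List Int :=
  let blue := PySem.Int.band (value >>> (10 : Nat)) 0x1F
  let green := PySem.Int.band (value >>> (5 : Nat)) 0x1F
  let red := PySem.Int.band value 0x1F
  [ PySem.Int.bor (red <<< (3 : Nat)) (red >>> (2 : Nat)),
    PySem.Int.bor (green <<< (3 : Nat)) (green >>> (2 : Nat)),
    PySem.Int.bor (blue <<< (3 : Nat)) (blue >>> (2 : Nat)) ]

def group_colors (words : List Int) (palette_size : Int) : List (List (List Int)) :=
  if PySem.Int.mod (words.length : Int) palette_size ≠ 0 then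
    []  -- Python raises ValueError here (ZeroDivisionError when palette_size = 0); excluded by Pre_
  else
    let colors := words.map bgr555_to_rgb888
    (PySem.List.pyRange 0 (colors.length : Int) palette_size).map
      (fun i => PySem.List.slice colors (some i) (some (i + palette_size)))

-- ===== PORT B =====
def group_colors_alt (words : List Int) (palette_size : Int) : List (List (List Int)) :=
  if PySem.Int.mod (words.length : Int) palette_size ≠ 0 then
    []  -- same guard, same raise in Source B; excluded by Pre_
  else
    (words.foldl
      (fun (acc : List (List (List Int)) × List (List Int)) value =>
        let red := PySem.Int.band value 0x1F
        let green := PySem.Int.band (value >>> (5 : Nat)) 0x1F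
        let blue := PySem.Int.band (value >>> (10 : Nat)) 0x1F
        let current := acc.2 ++
          [[ PySem.Int.bor (red <<< (3 : Nat)) (red >>> (2 : Nat)),
             PySem.Int.bor (green <<< (3 : Nat)) (green >>> (2 : Nat)),
             PySem.Int.bor (blue <<< (3 : Nat)) (blue >>> (2 : Nat)) ]]
        if (current.length : Int) = palette_size then (acc.1 ++ [current], [])
        else (acc.1, current))
      ([], [])).1

-- ===== PRECONDITION & SPEC =====
-- Pre_ excludes exactly the inputs where A raises: palette_size = 0 (ZeroDivisionError) and
-- word counts not divisible by palette_size (ValueError). A returns normally everywhere else.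
def Pre_group_colors (words : List Int) (palette_size : Int) : Prop :=
  palette_size ≠ 0 ∧ PySem.Int.mod (words.length : Int) palette_size = 0
instance (words : List Int) (palette_size : Int) : Decidable (Pre_group_colors words palette_size) := by
  unfold Pre_group_colors; infer_instance

def pvWitness_group_colors : List Int × Int := ([31, 992, 31744, 0], 2)

def Spec_group_colors (words : List Int) (palette_size : Int) (out : List (List (List Int))) : Prop :=
  out = group_colors_alt words palette_size
instance (words : List Int) (palette_size : Int) (out : List (List (List Int))) : Decidable (Spec_group_colors words palette_size out) := by
  unfold Spec_group_colors; infer_instance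

-- ===== CLAIM (what is proved, stated in full; the proofs are below) =====
def Claim_equal_group_colors : Prop := ∀ (words : List Int) (palette_size : Int), Dom_group_colors words palette_size → Pre_group_colors words palette_size → Spec_group_colors words palette_size (group_colors words palette_size)

-- ===== LEMMAS AND PROOFS =====

-- B's fold step, named for the proofs (definitionally the lambda inside group_colors_alt).
def stepB (p : Int) (acc : List (List (List Int)) × List (List Int)) (value : Int) :
    List (List (List Int)) × List (List Int) :=
  let current := acc.2 ++ [bgr555_to_rgb888 value]
  if (current.length : Int) = p then (acc.1 ++ [current], []) else (acc.1, current)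

theorem group_colors_alt_eq_stepB (words : List Int) (p : Int) :
    group_colors_alt words p =
      if PySem.Int.mod (words.length : Int) p ≠ 0 then []
      else (words.foldl (stepB p) ([], [])).1 := by
  rfl

-- The common chunk shape: m groups of np consecutive colors.
def chunksN (np : Nat) : Nat → List (List Int) → List (List (List Int))
  | 0, _ => []
  | m + 1, l => l.take np :: chunksN np m (l.drop np)

theorem stepB_neg (p : Int) (hp : p < 0) :
    ∀ (xs : List Int) (res : List (List (List Int))) (cur : List (List Int)),
      (xs.foldl (stepB p) (res, cur)).1 = res := by
  intro xs
  induction xs with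
  | nil => intro res cur; rfl
  | cons y ys ih =>
      intro res cur
      have hne : ¬ (((cur ++ [bgr555_to_rgb888 y]).length : Int) = p) := by
        intro h; have : (0 : Int) ≤ ((cur ++ [bgr555_to_rgb888 y]).length : Int) := Int.natCast_nonneg _
        omega
      simp only [List.foldl_cons, stepB, if_neg hne]
      exact ih res _

theorem stepB_fill (p : Int) (np : Nat) (hp : p = (np : Int)) :
    ∀ (ys : List Int) (res : List (List (List Int))) (cur : List (List Int)),
      0 < ys.length → cur.length + ys.length = np →
      ys.foldl (stepB p) (res, cur) = (res ++ [cur ++ ys.map bgr555_to_rgb888], []) := by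
  intro ys
  induction ys with
  | nil => intro res cur h _; simp at h
  | cons y ys ih =>
      intro res cur _ hlen
      by_cases hys : ys = []
      · subst hys
        simp only [List.length_cons, List.length_nil] at hlen
        have hl : (((cur ++ [bgr555_to_rgb888 y]).length : Int) = p) := by
          simp [hp]; omega
        simp only [List.foldl_cons, stepB, if_pos hl, List.foldl_nil, List.map_cons,
          List.map_nil]
      · have hpos : 0 < ys.length := List.length_pos_iff.mpr hys
        have hne : ¬ (((cur ++ [bgr555_to_rgb888 y]).length : Int) = p) := by
          simp only [List.length_append, List.length_cons] at hlen ⊢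
          simp [hp]; omega
        simp only [List.foldl_cons, stepB, if_neg hne]
        rw [ih res (cur ++ [bgr555_to_rgb888 y]) hpos (by simp at hlen ⊢; omega)]
        simp

theorem foldB_chunks (p : Int) (np : Nat) (hp : p = (np : Int)) (hnp : 0 < np) :
    ∀ (m : Nat) (xs : List Int) (res : List (List (List Int))),
      xs.length = m * np →
      (xs.foldl (stepB p) (res, [])).1 = res ++ chunksN np m (xs.map bgr555_to_rgb888) := by
  intro m
  induction m with
  | zero =>
      intro xs res hl
      have : xs = [] := List.eq_nil_of_length_eq_zero (by omega)
      subst this; simp [chunksN]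
  | succ m ih =>
      intro xs res hl
      have hxlen : np ≤ xs.length := by
        rw [hl]; calc np = 1 * np := (one_mul np).symm
          _ ≤ (m + 1) * np := Nat.mul_le_mul_right np (by omega)
      have hsplit : xs = xs.take np ++ xs.drop np := (List.take_append_drop np xs).symm
      have htake : (xs.take np).length = np := by rw [List.length_take]; omega
      have hdrop : (xs.drop np).length = m * np := by rw [List.length_drop, hl, Nat.succ_mul]; omega
      conv_lhs => rw [hsplit]
      rw [List.foldl_append]
      rw [stepB_fill p np hp (xs.take np) res [] (by rw [htake]; exact hnp) (by simp only [List.length_nil, Nat.zero_add]; exact htake)]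
      rw [ih (xs.drop np) _ hdrop]
      simp only [chunksN, List.map_take, List.map_drop, List.nil_append]
      rw [List.append_assoc]
      rfl

theorem chunks_of_range (np : Nat) :
    ∀ (m : Nat) (colors : List (List Int)),
      (List.range m).map (fun k => (colors.drop (np * k)).take np) = chunksN np m colors := by
  intro m
  induction m with
  | zero => intro colors; simp [chunksN]
  | succ m ih =>
      intro colors
      rw [List.range_succ_eq_map, List.map_cons, List.map_map]
      simp only [Nat.mul_zero, List.drop_zero]
      rw [chunksN]
      congr 1
      rw [← ih (colors.drop np)]
      apply List.map_congr_left
      intro k _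
      simp only [Function.comp_apply, List.drop_drop, Nat.succ_eq_add_one]
      congr 2
      ring

-- A's range-of-slices, for positive palette size, is exactly the chunk list.
theorem portA_chunks (p : Int) (np : Nat) (hp : p = (np : Int)) (hnp : 0 < np)
    (m : Nat) (colors : List (List Int)) (hlen : colors.length = m * np) :
    (PySem.List.pyRange 0 (colors.length : Int) p).map
      (fun i => PySem.List.slice colors (some i) (some (i + p))) = chunksN np m colors := by
  have hps : (0 : Int) < p := by rw [hp]; exact_mod_cast hnp
  rw [PySem.List.pyRange_of_pos 0 (colors.length : Int) hps]
  have hcount : (if (0 : Int) < (colors.length : Int)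
      then (((colors.length : Int) - 0 + p - 1) / p).toNat else 0) = m := by
    by_cases hm : m = 0
    · subst hm; simp at hlen; simp [hlen]
    · have hlpos : (0 : Int) < (colors.length : Int) := by
        have : 0 < colors.length := by
          rw [hlen]; exact Nat.mul_pos (Nat.pos_of_ne_zero hm) hnp
        exact_mod_cast this
      rw [if_pos hlpos]
      have hcast : (colors.length : Int) = (m : Int) * (np : Int) := by exact_mod_cast hlen
      have : ((colors.length : Int) - 0 + p - 1) / p = (m : Int) := by
        rw [hcast, hp]
        have h1 : (m : Int) * (np : Int) - 0 + (np : Int) - 1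
            = ((np : Int) - 1) + (m : Int) * (np : Int) := by ring
        rw [h1, Int.add_mul_ediv_right _ _ (by omega : (np : Int) ≠ 0)]
        rw [Int.ediv_eq_zero_of_lt (by omega) (by omega)]
        ring
      rw [this]; simp
  rw [hcount, List.map_map]
  rw [← chunks_of_range np m colors]
  apply List.map_congr_left
  intro k _
  simp only [Function.comp_apply, zero_add]
  have h1 : p * (k : Int) = ((np * k : Nat) : Int) := by rw [hp]; push_cast; ring
  rw [h1, hp, PySem.List.slice_natCast_add]

-- ===== VERDICT (by name: the statement is the Claim_ definition above) =====
theorem group_colors_spec : Claim_equal_group_colors := by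
  intro words p _hdom hpre
  obtain ⟨hp0, hmod⟩ := hpre
  unfold Spec_group_colors
  rw [group_colors_alt_eq_stepB]
  unfold group_colors
  rw [if_neg (by simpa using hmod), if_neg (by simpa using hmod)]
  change (PySem.List.pyRange 0 (((words.map bgr555_to_rgb888).length : Nat) : Int) p).map
      (fun i => PySem.List.slice (words.map bgr555_to_rgb888) (some i) (some (i + p)))
      = (words.foldl (stepB p) ([], [])).1
  rcases lt_or_gt_of_ne hp0 with hneg | hpos
  · -- negative palette size: A's range is empty, B never completes a group
    have hrange : PySem.List.pyRange 0 ((words.map bgr555_to_rgb888).length : Int) p = [] := by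
      simp only [PySem.List.pyRange]
      rw [if_neg hp0, if_neg (by omega : ¬ (0 : Int) < p),
        if_neg (by simp : ¬ ((words.map bgr555_to_rgb888).length : Int) < 0)]
      simp
    rw [hrange, List.map_nil, stepB_neg p hneg]

  · -- positive palette size: both sides are the chunk list
    set np := p.toNat with hnp
    have hp : p = (np : Int) := by omega
    have hnppos : 0 < np := by omega
    have hdvd : (np : Int) ∣ (words.length : Int) := by
      rw [← hp]; exact (PySem.Int.mod_eq_zero_iff_dvd _ _).mp hmod
    have hdvdn : np ∣ words.length := by exact_mod_cast hdvd
    obtain ⟨m, hm⟩ := hdvdn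
    have hm' : words.length = m * np := by rw [hm, Nat.mul_comm]
    rw [portA_chunks p np hp hnppos m (words.map bgr555_to_rgb888) (by simpa using hm')]
    rw [foldB_chunks p np hp hnppos m words [] hm']
    simp
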